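-- pv_equiv track=rewrite | github.com/Weng1002/-_Python- | 期中考/2020_midterm.py | check_no_shi_ba_la
-- ===== SOURCE A (Python) =====
-- def check_no_shi_ba_la(dice):
--     unique_count = 0
--     for i in range(len(dice)):
--         count = 0
--         for j in range(len(dice)):
--             if dice[i] == dice[j]:
--                 count += 1
--         if count == 1:
--             unique_count += 1
--     if unique_count == 4:
--         return False
--
--     for i in range(len(dice)):
--         count = 0
--         for j in range(len(dice)):
--             if dice[i] == dice[j]:
--                 count += 1
--         if count == 3:
--             return False
--
--     return True
-- ===== SOURCE B (Python) =====
-- def check_no_shi_ba_la(dice):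
--     counts = {}
--     for d in dice:
--         counts[d] = counts.get(d, 0) + 1
--     num_unique = sum(1 for v in counts.values() if v == 1)
--     if num_unique == 4:
--         return False
--     if 3 in counts.values():
--         return False
--     return True
-- ===== Notes on version B (the rewrite author's own statement) =====
-- stated objective: faster
-- what changed: Replaces the two quadratic index-rescanning loops with a frequency table built in one pass over the list, then a count of value-frequencies equal to 1 and a membership test for frequency 3 over the table's values.
import Mathlib
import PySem

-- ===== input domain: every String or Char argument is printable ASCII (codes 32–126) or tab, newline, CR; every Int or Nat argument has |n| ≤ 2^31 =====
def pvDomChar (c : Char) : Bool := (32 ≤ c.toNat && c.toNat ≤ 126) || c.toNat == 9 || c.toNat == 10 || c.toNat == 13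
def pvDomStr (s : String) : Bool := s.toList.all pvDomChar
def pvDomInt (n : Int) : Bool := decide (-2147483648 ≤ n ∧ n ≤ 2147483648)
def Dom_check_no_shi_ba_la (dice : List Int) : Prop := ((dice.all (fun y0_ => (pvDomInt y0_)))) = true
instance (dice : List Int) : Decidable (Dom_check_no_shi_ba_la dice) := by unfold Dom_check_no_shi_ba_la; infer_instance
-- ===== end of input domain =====

-- B replaces A's two quadratic index-scanning loops by one frequency table plus passes over its values (objective: simpler).


-- ===== PORT A =====
-- A's inner loop 'count = 0; for j in range(len(dice)): if dice[i] == dice[j]: count += 1'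
-- (both indices come from range(len(dice)), so pyGetD's default is never used)
def pvInnerCount (dice : List Int) (i : Int) : Int :=
  (PySem.List.pyRange 0 (PySem.List.len dice) 1).foldl
    (fun c j => if PySem.List.pyGetD dice i 0 == PySem.List.pyGetD dice j 0 then c + 1 else c) 0

def check_no_shi_ba_la (dice : List Int) : Bool :=
  let unique_count : Int :=
    (PySem.List.pyRange 0 (PySem.List.len dice) 1).foldl
      (fun uc i => if pvInnerCount dice i == 1 then uc + 1 else uc) 0
  if unique_count == 4 then false
  else if (PySem.List.pyRange 0 (PySem.List.len dice) 1).any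
            (fun i => pvInnerCount dice i == 3) then false  -- second loop's early 'return False'
  else true

-- ===== PORT B =====
def check_no_shi_ba_la_alt (dice : List Int) : Bool :=
  let counts : PySem.Dict Int Int :=
    dice.foldl (fun d x => d.modify x 0 (· + 1)) PySem.Dict.empty  -- counts[d] = counts.get(d, 0) + 1
  let num_unique : Int :=
    counts.values.foldl (fun s v => if v == 1 then s + 1 else s) 0  -- sum(1 for v in … if v == 1)
  if num_unique == 4 then false
  else if counts.values.contains 3 then false
  else true

-- ===== PRECONDITION & SPEC =====
def Spec_check_no_shi_ba_la (dice : List Int) (out : Bool) : Prop := out = check_no_shi_ba_la_alt dice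
instance (dice : List Int) (out : Bool) : Decidable (Spec_check_no_shi_ba_la dice out) := by unfold Spec_check_no_shi_ba_la; infer_instance

-- ===== CLAIM (what is proved, stated in full; the proofs are below) =====
def Claim_equal_check_no_shi_ba_la : Prop := ∀ (dice : List Int), Dom_check_no_shi_ba_la dice → Spec_check_no_shi_ba_la dice (check_no_shi_ba_la dice)

-- ===== LEMMAS AND PROOFS =====

-- A's inner loop counts the occurrences of dice[i] in dice.
theorem pvInnerCount_eq (dice : List Int) (i : Int) :
    pvInnerCount dice i = (dice.count (PySem.List.pyGetD dice i 0) : Int) := by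
  unfold pvInnerCount
  rw [PySem.List.len_eq, PySem.List.foldl_pyRange_zero_pyGetD' dice 0
    (fun c x => if PySem.List.pyGetD dice i 0 == x then c + 1 else c) 0,
    PySem.List.foldl_count_if]
  simp only [zero_add, List.count, Nat.cast_inj]
  exact List.countP_congr (fun x _ => by rw [Bool.beq_comm])

-- a 'for i in range(len(l))' any-loop reading only l[i] is an any over l
theorem pvAnyPyRange (l : List Int) (q : Int → Bool) :
    (PySem.List.pyRange 0 (l.length : Int) 1).any (fun i => q (PySem.List.pyGetD l i 0)) = l.any q := by
  conv_rhs => rw [← PySem.List.map_pyGetD_pyRange_zero' l 0]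
  rw [List.any_map]
  rfl

-- counting the values that occur exactly once gives the same number over the
-- list itself (A: one index per such value) and over its dedup (B: one key per such value)
theorem pvCountP_dedup (l : List Int) :
    l.countP (fun x => (l.count x : Int) == 1) = (PySem.List.dedup l).countP (fun x => (l.count x : Int) == 1) := by
  have hnf : (l.filter (fun x => (l.count x : Int) == 1)).Nodup := by
    rw [List.nodup_iff_count_le_one]
    intro a
    by_cases h : l.count a = 1
    · exact le_trans (List.Sublist.count_le a List.filter_sublist) (Nat.le_of_eq h)
    · have ha : a ∉ l.filter (fun x => (l.count x : Int) == 1) := by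
        simp [List.mem_filter, h]
      simp [List.count_eq_zero_of_not_mem ha]
  have hnd : ((PySem.List.dedup l).filter (fun x => (l.count x : Int) == 1)).Nodup :=
    List.Nodup.filter _ (PySem.List.nodup_dedup l)
  have hperm : List.Perm (l.filter (fun x => (l.count x : Int) == 1))
      ((PySem.List.dedup l).filter (fun x => (l.count x : Int) == 1)) := by
    rw [List.perm_ext_iff_of_nodup hnf hnd]
    intro a
    simp [List.mem_filter]
  rw [List.countP_eq_length_filter, List.countP_eq_length_filter, hperm.length_eq]

-- A reduced to value counts over the list.
theorem pvA_eq (dice : List Int) :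
    check_no_shi_ba_la dice =
      (if (dice.countP (fun x => (dice.count x : Int) == 1) : Int) == 4 then false
       else if dice.any (fun x => (dice.count x : Int) == 3) then false else true) := by
  unfold check_no_shi_ba_la
  simp only [pvInnerCount_eq]
  rw [PySem.List.len_eq, PySem.List.foldl_pyRange_zero_pyGetD' dice 0
    (fun uc x => if (dice.count x : Int) == 1 then uc + 1 else uc) 0,
    PySem.List.foldl_count_if]
  rw [pvAnyPyRange dice (fun x => (dice.count x : Int) == 3)]
  simp

-- B reduced to the same form via the counter dictionary.
theorem pvB_eq (dice : List Int) :
    check_no_shi_ba_la_alt dice =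
      (if (dice.countP (fun x => (dice.count x : Int) == 1) : Int) == 4 then false
       else if dice.any (fun x => (dice.count x : Int) == 3) then false else true) := by
  unfold check_no_shi_ba_la_alt
  dsimp only
  rw [← PySem.Dict.counter_eq_foldl]
  have hvals : (PySem.Dict.counter dice).values
      = (PySem.List.dedup dice).map (fun k => ((dice.count k : Int))) := by
    rw [PySem.Dict.values_eq_map_keys _ (PySem.Dict.nodup_keys_counter dice) 0,
      PySem.Dict.keys_counter]
    simp only [← PySem.List.dedup_eq_ofList]
    exact List.map_congr_left (fun k _ => PySem.Dict.getD_counter dice k)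
  rw [hvals, PySem.List.foldl_if_add_one, List.countP_map,
    List.contains_eq_any_beq, List.any_map]
  have h1 : (PySem.List.dedup dice).countP ((fun v => v == 1) ∘ fun k => (dice.count k : Int))
      = dice.countP (fun x => (dice.count x : Int) == 1) := (pvCountP_dedup dice).symm
  have h2 : (PySem.List.dedup dice).any ((fun x => (3:Int) == x) ∘ fun k => (dice.count k : Int))
      = dice.any (fun x => (dice.count x : Int) == 3) := by
    rw [Bool.eq_iff_iff, List.any_eq_true, List.any_eq_true]
    simp only [Function.comp, PySem.List.mem_dedup, beq_iff_eq]
    exact ⟨fun ⟨x, hx, h⟩ => ⟨x, hx, h.symm⟩, fun ⟨x, hx, h⟩ => ⟨x, hx, h.symm⟩⟩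
  rw [h1, h2]
  simp

-- ===== VERDICT (by name: the statement is the Claim_ definition above) =====
theorem check_no_shi_ba_la_spec : Claim_equal_check_no_shi_ba_la := by
  intro dice _
  unfold Spec_check_no_shi_ba_la
  rw [pvA_eq, pvB_eq]
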